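-- pv_equiv track=rewrite | github.com/CESNET/ndk-fpga | comp/debug/data_logger/sw/mem_logger/mem_logger.py | trim_hist
-- ===== SOURCE A (Python) =====
-- def trim_hist(data):
--     res = {}
--     res_tmp = {}
--
--     started = False
--     for k, v in data.items():
--         if v != 0 or started:
--             res_tmp[k] = v
--             started = True
--         elif v == 0 or not started:
--             res_tmp = {k: v}
--         if v != 0:
--             res = res_tmp.copy()
--
--     return res
-- ===== SOURCE B (Python) =====
-- def trim_hist(data):
--     items = list(data.items())
--     while items and items[-1][1] == 0:
--         items.pop()
--     while items and items[0][1] == 0: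
--         items.pop(0)
--     return dict(items)
-- ===== Notes on version B (the rewrite author's own statement) =====
-- stated objective: simpler
-- what changed: B trims the histogram from both ends (pop trailing zeros, then leading zeros) instead of A's forward scan that maintains a running candidate dict and copies it at every nonzero value.
-- intended difference: On inputs whose first value is 0 but that contain some nonzero value, A keeps the last leading zero entry in the result (its reset stores {k:0}, which survives once a nonzero value appears), while B drops all leading zeros, which is the intended trimming behaviour. — e.g. on trim_hist([(0, 0), (1, 2)]): A returns [(0, 0), (1, 2)], B returns [(1, 2)]
import Mathlib
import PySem

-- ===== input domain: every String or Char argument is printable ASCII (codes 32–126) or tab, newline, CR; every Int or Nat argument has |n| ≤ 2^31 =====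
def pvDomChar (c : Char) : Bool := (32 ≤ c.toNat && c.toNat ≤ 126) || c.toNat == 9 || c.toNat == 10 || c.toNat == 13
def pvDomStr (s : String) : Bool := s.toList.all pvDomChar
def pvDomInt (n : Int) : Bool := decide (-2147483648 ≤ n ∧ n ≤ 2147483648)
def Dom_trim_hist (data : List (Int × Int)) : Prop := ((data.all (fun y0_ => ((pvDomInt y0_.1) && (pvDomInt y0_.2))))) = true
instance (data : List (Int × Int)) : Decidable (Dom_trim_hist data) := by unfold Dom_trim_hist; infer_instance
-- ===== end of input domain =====

-- B trims the histogram from both ends (drop trailing zeros, then leading zeros) instead of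
-- A's forward scan maintaining a running candidate dict copied at every nonzero value; where
-- the input starts with zero values and has a nonzero one, A keeps the last leading zero and
-- B drops it (intended difference, stated as D_ below).

-- ===== PORT A =====
-- one step of A's `for k, v in data.items()` loop; state = (res, res_tmp, started)
def trimStepA (st : PySem.Dict Int Int × PySem.Dict Int Int × Bool) (kv : Int × Int) :
    PySem.Dict Int Int × PySem.Dict Int Int × Bool :=
  let res := st.1
  let tmp := st.2.1
  let started := st.2.2
  -- if v != 0 or started: res_tmp[k] = v; started = True
  -- elif v == 0 or not started: res_tmp = {k: v}   (the elif test is always true when reached)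
  let tmp' := if kv.2 != 0 || started then tmp.insert kv.1 kv.2 else PySem.Dict.ofList [kv]
  let started' := if kv.2 != 0 || started then true else started
  -- if v != 0: res = res_tmp.copy()
  let res' := if kv.2 != 0 then tmp' else res
  (res', tmp', started')

def trim_hist (data : List (Int × Int)) : List (Int × Int) :=
  (data.foldl trimStepA (PySem.Dict.empty, PySem.Dict.empty, false)).1.items

-- ===== PORT B =====
-- value-is-zero test used at both ends
def zeroVal (kv : Int × Int) : Bool := kv.2 == 0

def trim_hist_alt (data : List (Int × Int)) : List (Int × Int) :=
  -- while items and items[-1][1] == 0: items.pop()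
  let items := (List.dropWhile zeroVal data.reverse).reverse
  -- while items and items[0][1] == 0: items.pop(0)
  List.dropWhile zeroVal items

-- ===== PRECONDITION & SPEC =====
-- Pre_ excludes association lists with duplicate keys: they do not represent any Python dict
-- (A's parameter is a dict, whose items always have distinct keys).
def Pre_trim_hist (data : List (Int × Int)) : Prop :=
  List.Pairwise (fun a b : Int × Int => a.1 ≠ b.1) data
instance (data : List (Int × Int)) : Decidable (Pre_trim_hist data) := by
  unfold Pre_trim_hist; infer_instance

def pvWitness_trim_hist : (List (Int × Int)) := [(1, 0), (2, 3), (3, 0), (4, 5), (5, 0)]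

-- On inputs whose first value is 0 but that contain some nonzero value, A keeps the last
-- leading zero entry in the result (its reset stores {k: 0}, which survives once a nonzero
-- value appears), while B drops all leading zeros, the intended trimming behaviour.
def D_trim_hist (data : List (Int × Int)) : Prop :=
  (∃ x ∈ data, x.2 ≠ 0) ∧ (∃ y ∈ data.take 1, y.2 = 0)
instance (data : List (Int × Int)) : Decidable (D_trim_hist data) := by
  unfold D_trim_hist; infer_instance

def Spec_trim_hist (data : List (Int × Int)) (out : List (Int × Int)) : Prop :=
  ¬ D_trim_hist data → out = trim_hist_alt data
instance (data : List (Int × Int)) (out : List (Int × Int)) : Decidable (Spec_trim_hist data out) := by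
  unfold Spec_trim_hist; infer_instance

def pvDiffWitness_trim_hist : (List (Int × Int)) := [(0, 0), (1, 2)]
def pvDiffWitnessOut_trim_hist : (List (Int × Int)) × (List (Int × Int)) :=
  ([(0, 0), (1, 2)], [(1, 2)])

-- ===== CLAIM (what is proved, stated in full; the proofs are below) =====
def Claim_unchanged_trim_hist : Prop :=
  ∀ (data : List (Int × Int)), Dom_trim_hist data → Pre_trim_hist data →
    Spec_trim_hist data (trim_hist data)
def Claim_changed_trim_hist : Prop :=
  Dom_trim_hist (pvDiffWitness_trim_hist) ∧ Pre_trim_hist (pvDiffWitness_trim_hist) ∧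
  D_trim_hist (pvDiffWitness_trim_hist) ∧
  trim_hist (pvDiffWitness_trim_hist) = pvDiffWitnessOut_trim_hist.1 ∧
  trim_hist_alt (pvDiffWitness_trim_hist) = pvDiffWitnessOut_trim_hist.2 ∧
  pvDiffWitnessOut_trim_hist.1 ≠ pvDiffWitnessOut_trim_hist.2
def Claim_exact_trim_hist : Prop :=
  ∀ (data : List (Int × Int)), Dom_trim_hist data → Pre_trim_hist data → D_trim_hist data →
    trim_hist data ≠ trim_hist_alt data

-- ===== LEMMAS AND PROOFS =====

-- right trim, as port B computes it
def rtrim (l : List (Int × Int)) : List (Int × Int) :=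
  (List.dropWhile zeroVal l.reverse).reverse

lemma rtrim_eq_nil_iff (l : List (Int × Int)) :
    rtrim l = [] ↔ ∀ x ∈ l, x.2 = 0 := by
  simp [rtrim, List.dropWhile_eq_nil_iff, zeroVal]

lemma rtrim_cons_all_zero (kv : Int × Int) (t : List (Int × Int))
    (h : ∀ x ∈ t, x.2 = 0) :
    rtrim (kv :: t) = if kv.2 = 0 then [] else [kv] := by
  have hnil : List.dropWhile zeroVal t.reverse = [] := by
    rw [List.dropWhile_eq_nil_iff]
    intro x hx; simp [zeroVal, h x (List.mem_reverse.mp hx)]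
  simp [rtrim, List.dropWhile_append, hnil]
  split_ifs with h1 <;> simp [zeroVal, h1]

lemma rtrim_cons_of_nonzero (kv : Int × Int) (t : List (Int × Int))
    (h : ∃ x ∈ t, x.2 ≠ 0) :
    rtrim (kv :: t) = kv :: rtrim t := by
  have hnil : List.dropWhile zeroVal t.reverse ≠ [] := by
    rw [Ne, List.dropWhile_eq_nil_iff]
    push Not
    obtain ⟨x, hx, hxz⟩ := h
    exact ⟨x, List.mem_reverse.mpr hx, by simp [zeroVal, hxz]⟩
  simp [rtrim, List.dropWhile_append, List.isEmpty_iff, hnil]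

-- A's loop, while all values so far are zero and started is still false, keeps res unchanged:
lemma foldl_trimStepA_all_zero (l : List (Int × Int)) (res tmp : PySem.Dict Int Int)
    (hz : ∀ x ∈ l, x.2 = 0) :
    (l.foldl trimStepA (res, tmp, false)).1 = res := by
  induction l generalizing tmp with
  | nil => rfl
  | cons kv t ih =>
    have hkv : kv.2 = 0 := hz kv (by simp)
    simp only [List.foldl_cons, trimStepA, hkv]
    simpa using ih (PySem.Dict.ofList [kv]) (fun x hx => hz x (by simp [hx]))

-- A's loop in the started phase, over fresh distinct keys:
lemma foldl_trimStepA_started (l : List (Int × Int)) (res tmp : PySem.Dict Int Int)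
    (hfresh : ∀ x ∈ l, tmp.contains x.1 = false)
    (hpw : List.Pairwise (fun a b : Int × Int => a.1 ≠ b.1) l) :
    (l.foldl trimStepA (res, tmp, true)).1.items =
      if ∀ x ∈ l, x.2 = 0 then res.items else tmp.items ++ rtrim l := by
  induction l generalizing res tmp with
  | nil => simp
  | cons kv t ih =>
    have hins : (tmp.insert kv.1 kv.2).items = tmp.items ++ [kv] := by
      rw [PySem.Dict.items_insert_of_not_contains tmp kv.2 (hfresh kv (by simp))]
    have hfresh' : ∀ x ∈ t, (tmp.insert kv.1 kv.2).contains x.1 = false := by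
      intro x hx
      rw [PySem.Dict.contains_insert tmp kv.1 x.1 kv.2]
      have h1 : x.1 ≠ kv.1 := (List.pairwise_cons.mp hpw).1 x hx |>.symm
      simp [h1, hfresh x (by simp [hx])]
    have hpw' := (List.pairwise_cons.mp hpw).2
    simp only [List.foldl_cons, trimStepA]
    by_cases hkv : kv.2 = 0
    · have hb : (kv.2 != 0) = false := by simpa using hkv
      simp only [hb, Bool.false_or, if_true, Bool.false_eq_true, if_false]
      rw [ih res (tmp.insert kv.1 kv.2) hfresh' hpw']
      by_cases hT : ∀ x ∈ t, x.2 = 0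
      · have hall : ∀ x ∈ kv :: t, x.2 = 0 := by
          intro x hx
          rcases List.mem_cons.mp hx with h | h
          · rw [h]; exact hkv
          · exact hT x h
        rw [if_pos hT, if_pos hall]
      · have hnz : ∃ x ∈ t, x.2 ≠ 0 := by push Not at hT; exact hT
        have hcond : ¬ ∀ x ∈ kv :: t, x.2 = 0 := by
          intro hall; obtain ⟨x, hx, hxz⟩ := hnz; exact hxz (hall x (by simp [hx]))
        rw [if_neg hT, if_neg hcond, hins, rtrim_cons_of_nonzero kv t hnz]
        simp
    · have hb : (kv.2 != 0) = true := by simpa using hkv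
      simp only [hb, Bool.true_or, if_true]
      rw [ih (tmp.insert kv.1 kv.2) (tmp.insert kv.1 kv.2) hfresh' hpw']
      have hcond : ¬ ∀ x ∈ kv :: t, x.2 = 0 := by
        intro hall; exact hkv (hall kv (by simp))
      rw [if_neg hcond]
      by_cases hT : ∀ x ∈ t, x.2 = 0
      · rw [if_pos hT, hins, rtrim_cons_all_zero kv t hT, if_neg hkv]
      · have hnz : ∃ x ∈ t, x.2 ≠ 0 := by push Not at hT; exact hT
        rw [if_neg hT, hins, rtrim_cons_of_nonzero kv t hnz]
        simp

lemma trim_hist_alt_characterization (data : List (Int × Int)) :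
    trim_hist_alt data = List.dropWhile zeroVal (rtrim data) := rfl

lemma dropWhile_head_not (l : List (Int × Int)) (h : List.dropWhile zeroVal l ≠ []) :
    ∃ h' t', List.dropWhile zeroVal l = h' :: t' ∧ zeroVal h' = false := by
  induction l with
  | nil => simp at h
  | cons a t ih =>
    by_cases ha : zeroVal a
    · rw [List.dropWhile_cons_of_pos ha] at h ⊢
      exact ih h
    · rw [List.dropWhile_cons_of_neg ha]
      exact ⟨a, t, rfl, by simpa using ha⟩

theorem trim_hist_main (data : List (Int × Int)) (hpre : Pre_trim_hist data)
    (hD : ¬ D_trim_hist data) : trim_hist data = trim_hist_alt data := by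
  rw [trim_hist_alt_characterization]
  cases data with
  | nil => rfl
  | cons kv t =>
    have hpw' := (List.pairwise_cons.mp hpre).2
    by_cases hkv : kv.2 = 0
    · -- ¬D_ forces everything to be zero
      have hall : ∀ x ∈ kv :: t, x.2 = 0 := by
        by_contra hc
        push Not at hc
        exact hD ⟨hc, ⟨kv, by simp, hkv⟩⟩
      have hz : ∀ x ∈ t, x.2 = 0 := fun x hx => hall x (by simp [hx])
      have hb : (kv.2 != 0) = false := by simpa using hkv
      have hA : trim_hist (kv :: t) = [] := by
        unfold trim_hist
        simp only [List.foldl_cons, trimStepA, hb, Bool.false_or, Bool.false_eq_true,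
          if_false]
        rw [foldl_trimStepA_all_zero t PySem.Dict.empty (PySem.Dict.ofList [kv]) hz]
        rfl
      have hB : List.dropWhile zeroVal (rtrim (kv :: t)) = [] := by
        rw [(rtrim_eq_nil_iff (kv :: t)).mpr hall]
        rfl
      rw [hA, hB]
    · -- head nonzero
      have hb : (kv.2 != 0) = true := by simpa using hkv
      have hfresh : ∀ x ∈ t, (PySem.Dict.empty.insert kv.1 kv.2).contains x.1 = false := by
        intro x hx
        rw [PySem.Dict.contains_insert PySem.Dict.empty kv.1 x.1 kv.2]
        have h1 : x.1 ≠ kv.1 := ((List.pairwise_cons.mp hpre).1 x hx).symm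
        simp [h1]
      have hins : (PySem.Dict.empty.insert kv.1 kv.2).items = [kv] := by
        rw [PySem.Dict.items_insert_of_not_contains PySem.Dict.empty kv.2 (by simp)]
        rfl
      have hA : trim_hist (kv :: t) = kv :: rtrim t := by
        unfold trim_hist
        simp only [List.foldl_cons, trimStepA, hb, Bool.true_or, if_true]
        rw [foldl_trimStepA_started t (PySem.Dict.empty.insert kv.1 kv.2)
          (PySem.Dict.empty.insert kv.1 kv.2) hfresh hpw']
        by_cases hT : ∀ x ∈ t, x.2 = 0
        · rw [if_pos hT, hins, (rtrim_eq_nil_iff t).mpr hT]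
        · rw [if_neg hT, hins]
          rfl
      rw [hA]
      by_cases hT : ∀ x ∈ t, x.2 = 0
      · rw [rtrim_cons_all_zero kv t hT, if_neg hkv, (rtrim_eq_nil_iff t).mpr hT]
        have hbe : (kv.2 == 0) = false := by simpa using hkv
        simp [List.dropWhile, zeroVal, hbe]
      · have hnz : ∃ x ∈ t, x.2 ≠ 0 := by push Not at hT; exact hT
        rw [rtrim_cons_of_nonzero kv t hnz]
        rw [List.dropWhile_cons_of_neg (by simpa [zeroVal] using hkv)]

-- the unstarted phase keeps one zero entry in res_tmp; once a nonzero value appears the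
-- result starts with that zero entry
lemma foldl_trimStepA_unstarted_head (l : List (Int × Int)) (z : Int × Int)
    (hz : z.2 = 0)
    (hnz : ∃ x ∈ l, x.2 ≠ 0)
    (hfz : ∀ x ∈ l, x.1 ≠ z.1)
    (hpw : List.Pairwise (fun a b : Int × Int => a.1 ≠ b.1) l) :
    ∃ z' rest, z'.2 = 0 ∧
      (l.foldl trimStepA (PySem.Dict.empty, PySem.Dict.ofList [z], false)).1.items = z' :: rest := by
  induction l generalizing z with
  | nil => simp at hnz
  | cons kv t ih =>
    have hpw' := (List.pairwise_cons.mp hpw).2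
    by_cases hkv : kv.2 = 0
    · have hb : (kv.2 != 0) = false := by simpa using hkv
      have hnz' : ∃ x ∈ t, x.2 ≠ 0 := by
        obtain ⟨x, hx, hxz⟩ := hnz
        rcases List.mem_cons.mp hx with h | h
        · exact absurd hkv (h ▸ hxz)
        · exact ⟨x, h, hxz⟩
      simp only [List.foldl_cons, trimStepA, hb, Bool.false_or, Bool.false_eq_true, if_false]
      exact ih kv hkv hnz' (fun x hx => ((List.pairwise_cons.mp hpw).1 x hx).symm) hpw'
    · have hb : (kv.2 != 0) = true := by simpa using hkv
      have hzcon : (PySem.Dict.ofList [z]).contains kv.1 = false := by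
        have : kv.1 ≠ z.1 := hfz kv (by simp)
        rw [show PySem.Dict.ofList [z] = PySem.Dict.mk [z] from rfl, PySem.Dict.contains_mk]
        simp [this.symm]
      have hins : ((PySem.Dict.ofList [z]).insert kv.1 kv.2).items = [z, kv] := by
        rw [PySem.Dict.items_insert_of_not_contains (PySem.Dict.ofList [z]) kv.2 hzcon]
        rfl
      have hfresh : ∀ x ∈ t, ((PySem.Dict.ofList [z]).insert kv.1 kv.2).contains x.1 = false := by
        intro x hx
        rw [PySem.Dict.contains_insert (PySem.Dict.ofList [z]) kv.1 x.1 kv.2]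
        have h1 : x.1 ≠ kv.1 := ((List.pairwise_cons.mp hpw).1 x hx).symm
        have h2 : x.1 ≠ z.1 := hfz x (by simp [hx])
        rw [show PySem.Dict.ofList [z] = PySem.Dict.mk [z] from rfl, PySem.Dict.contains_mk]
        simp [h1, h2.symm]
      simp only [List.foldl_cons, trimStepA, hb, Bool.true_or, if_true]
      rw [foldl_trimStepA_started t ((PySem.Dict.ofList [z]).insert kv.1 kv.2)
        ((PySem.Dict.ofList [z]).insert kv.1 kv.2) hfresh hpw']
      by_cases hT : ∀ x ∈ t, x.2 = 0
      · exact ⟨z, [kv], hz, by rw [if_pos hT, hins]⟩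
      · exact ⟨z, kv :: rtrim t, hz, by rw [if_neg hT, hins]; rfl⟩

theorem trim_hist_tight' (data : List (Int × Int)) (hpre : Pre_trim_hist data)
    (hD : D_trim_hist data) : trim_hist data ≠ trim_hist_alt data := by
  obtain ⟨⟨x, hx, hxz⟩, ⟨y, hy, hyz⟩⟩ := hD
  cases data with
  | nil => simp at hx
  | cons kv t =>
    have hkv : kv.2 = 0 := by
      simp only [List.take, List.mem_singleton] at hy
      exact hy ▸ hyz
    have hnz' : ∃ w ∈ t, w.2 ≠ 0 := by
      rcases List.mem_cons.mp hx with h | h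
      · exact absurd hkv (h ▸ hxz)
      · exact ⟨x, h, hxz⟩
    -- A's result starts with a zero-valued entry
    have hb : (kv.2 != 0) = false := by simpa using hkv
    have hA : ∃ z' rest, z'.2 = 0 ∧ trim_hist (kv :: t) = z' :: rest := by
      unfold trim_hist
      simp only [List.foldl_cons, trimStepA, hb, Bool.false_or, Bool.false_eq_true, if_false]
      exact foldl_trimStepA_unstarted_head t kv hkv hnz'
        (fun w hw => ((List.pairwise_cons.mp hpre).1 w hw).symm)
        (List.pairwise_cons.mp hpre).2
    -- B's result starts with a nonzero-valued entry
    have hBne : trim_hist_alt (kv :: t) ≠ [] := by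
      rw [trim_hist_alt_characterization, Ne, List.dropWhile_eq_nil_iff]
      push Not
      have hrt : rtrim (kv :: t) = kv :: rtrim t := rtrim_cons_of_nonzero kv t hnz'
      -- the last element of rtrim (kv :: t) is nonzero
      obtain ⟨w, hw, hwz⟩ := hnz'
      have hdw : List.dropWhile zeroVal (kv :: t).reverse ≠ [] := by
        rw [Ne, List.dropWhile_eq_nil_iff]
        push Not
        exact ⟨w, by simp [hw], by simp [zeroVal, hwz]⟩
      obtain ⟨h', t', hht, hhz⟩ := dropWhile_head_not _ hdw
      refine ⟨h', ?_, by simp [hhz]⟩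
      show h' ∈ rtrim (kv :: t)
      rw [rtrim]
      rw [hht]
      simp
    have hB : ∃ h' t', trim_hist_alt (kv :: t) = h' :: t' ∧ zeroVal h' = false := by
      rw [trim_hist_alt_characterization] at hBne ⊢
      exact dropWhile_head_not _ hBne
    obtain ⟨z', rest, hz', hAeq⟩ := hA
    obtain ⟨h', t', hBeq, hh'⟩ := hB
    intro hcontra
    rw [hAeq, hBeq] at hcontra
    have : z' = h' := (List.cons.injEq _ _ _ _ ▸ hcontra).1
    rw [← this] at hh'
    simp [zeroVal, hz'] at hh'

-- ===== VERDICT (by name: the statement is the Claim_ definition above) =====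
theorem trim_hist_spec : Claim_unchanged_trim_hist :=
  fun data _ hpre hD => trim_hist_main data hpre hD

theorem trim_hist_changed : Claim_changed_trim_hist := by
  unfold Claim_changed_trim_hist; decide

theorem trim_hist_tight : Claim_exact_trim_hist :=
  fun data _ hpre hD => trim_hist_tight' data hpre hD
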